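-- pv_equiv track=rewrite | github.com/AnshulYADAV007/weCohort4DSA | Greedy/increasing-triplet-subsequence.py | getIsLeftSmallerExist
-- ===== SOURCE A (Python) =====
-- def getIsLeftSmallerExist(nums):
--     answer = []
--     minimum = nums[0]
--     for num in nums:
--         if num > minimum:
--             answer.append(True)
--         else:
--             minimum = num
--             answer.append(False)
--     return answer
-- ===== SOURCE B (Python) =====
-- def getIsLeftSmallerExist(nums):
--     # pass 1: materialise the running-minimum table pre[i] = min(nums[0..i])
--     pre = [nums[0]]
--     for x in nums[1:]:
--         pre.append(min(pre[-1], x))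
--     # pass 2: compare each element with the minimum of the strictly earlier
--     # prefix (nums[0] itself for index 0, so that slot is always False)
--     return [x > m for x, m in zip(nums, [nums[0]] + pre[:-1])]
-- ===== Notes on version B (the rewrite author's own statement) =====
-- stated objective: alternative
-- what changed: A maintains a scalar running minimum inside one branching loop that appends to the answer; B first materialises a prefix-minimum table in one pass and then maps a branch-free comparison over the list zipped with the shifted table.
import Mathlib
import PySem

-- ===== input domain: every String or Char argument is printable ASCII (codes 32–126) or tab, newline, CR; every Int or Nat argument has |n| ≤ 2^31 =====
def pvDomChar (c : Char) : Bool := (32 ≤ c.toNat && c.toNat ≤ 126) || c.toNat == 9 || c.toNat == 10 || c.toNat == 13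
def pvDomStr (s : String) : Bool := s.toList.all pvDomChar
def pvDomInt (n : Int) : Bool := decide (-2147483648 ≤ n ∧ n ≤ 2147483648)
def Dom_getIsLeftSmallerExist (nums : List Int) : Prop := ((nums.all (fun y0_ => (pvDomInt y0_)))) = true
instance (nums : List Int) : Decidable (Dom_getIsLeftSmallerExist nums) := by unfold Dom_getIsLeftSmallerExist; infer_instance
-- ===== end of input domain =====

-- B replaces A's scalar running-minimum loop with a prefix-minimum table plus a
-- zipped branch-free comparison pass (alternative decomposition, same O(n) cost).


-- ===== PORT A =====
-- 'minimum = nums[0]' raises IndexError on []; the none branch is excluded by Pre_.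
def getIsLeftSmallerExist (nums : List Int) : List Bool :=
  match PySem.List.pyGet? nums 0 with
  | none => []
  | some m0 =>
    (nums.foldl
      (fun (st : Int × List Bool) num =>
        if num > st.1 then (st.1, st.2 ++ [true])
        else (num, st.2 ++ [false]))
      (m0, ([] : List Bool))).2

-- ===== PORT B =====
-- 'pre = [nums[0]]' raises IndexError on []; pre[-1] is getLastD (pre is always
-- nonempty, so the default is never used); pre[:-1] is PySem.List.slice none (-1).
def getIsLeftSmallerExist_alt (nums : List Int) : List Bool :=
  match PySem.List.pyGet? nums 0 with
  | none => []
  | some h =>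
    let pre := (PySem.List.slice nums (some 1) none).foldl
        (fun acc x => acc ++ [min (acc.getLastD h) x]) [h]
    ((nums.zip ([h] ++ PySem.List.slice pre none (some (-1)))).map
      (fun p => decide (p.1 > p.2)))

-- ===== PRECONDITION & SPEC =====
-- Pre_ excludes only the empty list, on which both A and B raise IndexError at nums[0].
def Pre_getIsLeftSmallerExist (nums : List Int) : Prop := nums ≠ []
instance (nums : List Int) : Decidable (Pre_getIsLeftSmallerExist nums) := by unfold Pre_getIsLeftSmallerExist; infer_instance
def pvWitness_getIsLeftSmallerExist : List Int := ([5, 1, 4, 2] : List Int)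

def Spec_getIsLeftSmallerExist (nums : List Int) (out : List Bool) : Prop := out = getIsLeftSmallerExist_alt nums
instance (nums : List Int) (out : List Bool) : Decidable (Spec_getIsLeftSmallerExist nums out) := by unfold Spec_getIsLeftSmallerExist; infer_instance

-- ===== CLAIM (what is proved, stated in full; the proofs are below) =====
def Claim_equal_getIsLeftSmallerExist : Prop := ∀ (nums : List Int), Dom_getIsLeftSmallerExist nums → Pre_getIsLeftSmallerExist nums → Spec_getIsLeftSmallerExist nums (getIsLeftSmallerExist nums)

-- ===== LEMMAS AND PROOFS =====

-- Reference recursion: answer element then recurse with the updated minimum.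
def pvRef (m : Int) : List Int → List Bool
  | [] => []
  | x :: xs => decide (x > m) :: pvRef (min m x) xs

-- Prefix-minimum list: pvMins m l = [min m l0, min m l0 l1, …].
def pvMins (m : Int) : List Int → List Int
  | [] => []
  | x :: xs => min m x :: pvMins (min m x) xs

theorem pvMins_length (m : Int) (l : List Int) : (pvMins m l).length = l.length := by
  induction l generalizing m with
  | nil => rfl
  | cons x xs ih => simp [pvMins, ih]

-- A's fold accumulates acc ++ pvRef m l.
theorem pvFoldA (l : List Int) (m : Int) (acc : List Bool) :
    (l.foldl
      (fun (st : Int × List Bool) num =>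
        if num > st.1 then (st.1, st.2 ++ [true])
        else (num, st.2 ++ [false]))
      (m, acc)).2 = acc ++ pvRef m l := by
  induction l generalizing m acc with
  | nil => simp [pvRef]
  | cons x xs ih =>
    by_cases h : x > m
    · have hm : min m x = m := by omega
      simp [List.foldl_cons, h, ih, pvRef, hm]
    · have hm : min m x = x := by omega
      simp [List.foldl_cons, h, ih, pvRef, hm]

-- B's table fold accumulates acc ++ pvMins p l, where p is acc's last element.
theorem pvFoldB (h : Int) (l : List Int) (acc : List Int) (p : Int)
    (hl : acc.getLastD h = p) :
    (l.foldl (fun acc x => acc ++ [min (acc.getLastD h) x]) acc)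
      = acc ++ pvMins p l := by
  induction l generalizing acc p with
  | nil => simp [pvMins]
  | cons x xs ih =>
    have hlast : (acc ++ [min p x]).getLastD h = min p x := by
      simp [List.getLastD_concat]
    calc ((x :: xs).foldl (fun acc x => acc ++ [min (acc.getLastD h) x]) acc)
        = xs.foldl (fun acc x => acc ++ [min (acc.getLastD h) x]) (acc ++ [min p x]) := by
          rw [List.foldl_cons, hl]
      _ = (acc ++ [min p x]) ++ pvMins (min p x) xs := ih _ _ hlast
      _ = acc ++ pvMins p (x :: xs) := by simp [pvMins]

-- zip-map with the second list truncated to the first's length is unchanged.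
theorem pvZipTake {α β γ : Type} (f : α × β → γ) (l : List α) (l' : List β) :
    ((l.zip (l'.take l.length)).map f) = (l.zip l').map f := by
  induction l generalizing l' with
  | nil => simp
  | cons x xs ih =>
    cases l' with
    | nil => simp
    | cons y ys => simp [List.zip_cons_cons, ih]

-- the comparison pass over the shifted prefix-min table is pvRef.
theorem pvZipRef (l : List Int) (m : Int) :
    ((l.zip (m :: pvMins m l)).map (fun p => decide (p.1 > p.2))) = pvRef m l := by
  induction l generalizing m with
  | nil => simp [pvRef]
  | cons x xs ih => simp [pvMins, pvRef, List.zip_cons_cons, ih]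

-- ===== VERDICT (by name: the statement is the Claim_ definition above) =====
theorem getIsLeftSmallerExist_spec : Claim_equal_getIsLeftSmallerExist := by
  intro nums _ hpre
  obtain ⟨m0, t, rfl⟩ : ∃ m0 t, nums = m0 :: t := by
    cases nums with
    | nil => exact absurd rfl hpre
    | cons a l => exact ⟨a, l, rfl⟩
  unfold Spec_getIsLeftSmallerExist getIsLeftSmallerExist getIsLeftSmallerExist_alt
  simp only [PySem.List.pyGet?_zero_cons, PySem.List.slice_from_one,
    PySem.List.slice_to_neg_one, List.tail_cons]
  rw [pvFoldA, pvFoldB m0 t [m0] m0 (by simp)]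
  have hpre' : (([m0] ++ pvMins m0 t) : List Int).dropLast
      = ([m0] ++ pvMins m0 t).take t.length := by
    rw [List.dropLast_eq_take]
    simp [pvMins_length]
  rw [hpre']
  have := pvZipTake (fun p : Int × Int => decide (p.1 > p.2)) (m0 :: t) ([m0] ++ pvMins m0 t)
  rw [show ([m0] ++ ([m0] ++ pvMins m0 t).take t.length)
      = (([m0] ++ ([m0] ++ pvMins m0 t)).take (t.length + 1)) by simp]
  rw [show (t.length + 1) = (m0 :: t).length by simp]
  rw [pvZipTake]
  have : ([m0] ++ ([m0] ++ pvMins m0 t)) = m0 :: (m0 :: pvMins m0 t) := by simp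
  rw [this]
  simp [pvRef, List.zip_cons_cons, pvZipRef]
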